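-- pv_equiv track=rewrite | github.com/UnmotivatedVergil46/Ai-Diet-Tracker-Project-sem-4 | data/python csv converter.py | is_food_compatible
-- ===== SOURCE A (Python) =====
-- def is_food_compatible(food, dietary_restrictions):
--     restrictions = [r.lower() for r in dietary_restrictions]
--     diet_type = food.get('diet_type', 'unknown')
--
--     if 'vegan' in restrictions and diet_type != 'vegan':
--         return False
--     if 'vegetarian' in restrictions and diet_type not in ('vegan', 'vegetarian'):
--         return False
--     if 'lactose-free' in restrictions and diet_type != 'lactose-free':
--         return False
--     if 'gluten-free' in restrictions and diet_type != 'gluten-free':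
--         return False
--
--     return True
-- ===== SOURCE B (Python) =====
-- ALLOWED = {
--     'vegan': {'vegan'},
--     'vegetarian': {'vegan', 'vegetarian'},
--     'lactose-free': {'lactose-free'},
--     'gluten-free': {'gluten-free'},
-- }
--
-- def is_food_compatible(food, dietary_restrictions):
--     diet_type = food.get('diet_type', 'unknown')
--     for r in dietary_restrictions:
--         allowed = ALLOWED.get(r.lower())
--         if allowed is not None and diet_type not in allowed:
--             return False
--     return True
-- ===== Notes on version B (the rewrite author's own statement) =====
-- stated objective: simpler
-- what changed: Replaced the four fixed membership scans of the lowercased restriction list by a single pass over the restrictions driven by a table mapping each known restriction to the diet_types it permits.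
import Mathlib
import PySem

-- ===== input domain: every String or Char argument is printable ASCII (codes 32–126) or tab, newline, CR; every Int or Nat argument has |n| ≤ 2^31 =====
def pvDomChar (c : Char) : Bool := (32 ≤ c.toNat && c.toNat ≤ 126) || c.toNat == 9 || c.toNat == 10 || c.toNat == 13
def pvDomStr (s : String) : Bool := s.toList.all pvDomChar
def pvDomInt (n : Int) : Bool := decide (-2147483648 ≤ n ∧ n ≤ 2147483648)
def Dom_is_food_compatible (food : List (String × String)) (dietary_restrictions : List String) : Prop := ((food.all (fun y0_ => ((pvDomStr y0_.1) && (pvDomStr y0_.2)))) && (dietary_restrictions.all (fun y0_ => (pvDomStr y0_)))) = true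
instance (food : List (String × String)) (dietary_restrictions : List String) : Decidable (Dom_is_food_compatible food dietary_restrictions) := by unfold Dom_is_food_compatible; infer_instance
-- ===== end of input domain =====

-- B replaces A's four fixed membership scans with one table-driven pass over the restrictions (objective: simpler).
-- ===== PORT A =====
def is_food_compatible (food : List (String × String)) (dietary_restrictions : List String) : Bool :=
  let restrictions := dietary_restrictions.map PySem.Str.lower
  let diet_type := PySem.Dict.getD (PySem.Dict.mk food) "diet_type" "unknown"
  if restrictions.contains "vegan" && !(diet_type == "vegan") then false
  else if restrictions.contains "vegetarian" && !(diet_type == "vegan" || diet_type == "vegetarian") then false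
  else if restrictions.contains "lactose-free" && !(diet_type == "lactose-free") then false
  else if restrictions.contains "gluten-free" && !(diet_type == "gluten-free") then false
  else true

-- ===== PORT B =====
-- the ALLOWED table: restriction name -> set of permitted diet_types (ALLOWED.get(r), none = unknown restriction)
def pvAllowedGet (r : String) : Option (List String) :=
  PySem.Dict.get? (PySem.Dict.mk
    [("vegan", ["vegan"]), ("vegetarian", ["vegan", "vegetarian"]),
     ("lactose-free", ["lactose-free"]), ("gluten-free", ["gluten-free"])]) r

-- the for-loop over dietary_restrictions with early return False
def pvAltLoop (diet_type : String) : List String → Bool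
  | [] => true
  | r :: rs =>
    match pvAllowedGet (PySem.Str.lower r) with
    | some allowed => if !(allowed.contains diet_type) then false else pvAltLoop diet_type rs
    | none => pvAltLoop diet_type rs

def is_food_compatible_alt (food : List (String × String)) (dietary_restrictions : List String) : Bool :=
  pvAltLoop (PySem.Dict.getD (PySem.Dict.mk food) "diet_type" "unknown") dietary_restrictions

-- ===== PRECONDITION & SPEC =====
def Spec_is_food_compatible (food : List (String × String)) (dietary_restrictions : List String) (out : Bool) : Prop := out = is_food_compatible_alt food dietary_restrictions
instance (food : List (String × String)) (dietary_restrictions : List String) (out : Bool) : Decidable (Spec_is_food_compatible food dietary_restrictions out) := by unfold Spec_is_food_compatible; infer_instance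

-- ===== CLAIM (what is proved, stated in full; the proofs are below) =====
def Claim_equal_is_food_compatible : Prop := ∀ (food : List (String × String)) (dietary_restrictions : List String), Dom_is_food_compatible food dietary_restrictions → Spec_is_food_compatible food dietary_restrictions (is_food_compatible food dietary_restrictions)

-- ===== LEMMAS AND PROOFS =====

-- per-restriction check B performs
def pvStep (dt r : String) : Bool :=
  match pvAllowedGet (PySem.Str.lower r) with
  | some allowed => allowed.contains dt
  | none => true

theorem pvAltLoop_eq_all (dt : String) (dr : List String) :
    pvAltLoop dt dr = dr.all (fun r => pvStep dt r) := by
  induction dr with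
  | nil => rfl
  | cons r rs ih =>
    rw [List.all_cons, ← ih]
    simp only [pvAltLoop, pvStep]
    cases pvAllowedGet (PySem.Str.lower r) with
    | none => simp
    | some allowed =>
      cases hc : allowed.contains dt <;> simp_all

theorem pvAll_eq_scan (dt : String) (dr : List String) :
    dr.all (fun r => pvStep dt r) =
      (!((dr.map PySem.Str.lower).contains "vegan" && !(dt == "vegan")) &&
       !((dr.map PySem.Str.lower).contains "vegetarian" && !(dt == "vegan" || dt == "vegetarian")) &&
       !((dr.map PySem.Str.lower).contains "lactose-free" && !(dt == "lactose-free")) &&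
       !((dr.map PySem.Str.lower).contains "gluten-free" && !(dt == "gluten-free"))) := by
  induction dr with
  | nil => simp
  | cons r rs ih =>
    simp only [List.all_cons, List.map_cons, List.contains_cons]
    rw [ih]
    simp only [pvStep, pvAllowedGet, PySem.Dict.get?]
    by_cases h1 : PySem.Str.lower r = "vegan"
    · simp [h1]; by_cases hd : dt = "vegan" <;> simp [hd]
    by_cases h2 : PySem.Str.lower r = "vegetarian"
    · simp [h2]
      by_cases hd : dt = "vegan" <;> by_cases hd2 : dt = "vegetarian" <;> simp [hd, hd2]
    by_cases h3 : PySem.Str.lower r = "lactose-free"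
    · simp [h3]; by_cases hd : dt = "lactose-free" <;> simp [hd]
    by_cases h4 : PySem.Str.lower r = "gluten-free"
    · simp [h4]; by_cases hd : dt = "gluten-free" <;> simp [hd]
    · have h1' : "vegan" ≠ PySem.Str.lower r := fun e => h1 e.symm
      have h2' : "vegetarian" ≠ PySem.Str.lower r := fun e => h2 e.symm
      have h3' : "lactose-free" ≠ PySem.Str.lower r := fun e => h3 e.symm
      have h4' : "gluten-free" ≠ PySem.Str.lower r := fun e => h4 e.symm
      rw [Bool.eq_iff_iff]
      simp [h1', h2', h3', h4']

-- ===== VERDICT (by name: the statement is the Claim_ definition above) =====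
theorem is_food_compatible_spec : Claim_equal_is_food_compatible := by
  intro food dr _
  unfold Spec_is_food_compatible is_food_compatible is_food_compatible_alt
  rw [pvAltLoop_eq_all, pvAll_eq_scan, Bool.eq_iff_iff]
  simp [Bool.and_assoc]
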